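-- pv_equiv track=rewrite | github.com/ZulfaNurhuda/ComputationalThinking | Laboratory/Other/3.1.1-python-id-p3/3.1.1-p3-problem2.py | convertMessage
-- ===== SOURCE A (Python) =====
-- def convertMessage(message: str) -> int:
--     """ Description: `[FUNCTION] convertMessage` """
--     # +-------------------------------------------------+
--     # | FUNCTION <Convert Message>                      |
--     # +-------------------------------------------------+
--     # | ACCEPTS A STRING MESSAGE AND RETURNS AN INTEGER |
--     # | REPRESENTING THE CONVERTED NUMERICAL VALUE.     |
--     # +-------------------------------------------------+
--
--     # +--------------------+-----------+
--     # | LOCAL DICTIONARY   | DATA TYPE |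
--     # +--------------------+-----------+
--     # | message            | string    |
--     # | total              | integer   |
--     # | letter             | string    |
--     # | value              | integer   |
--     # +--------------------+-----------+
--
--     """ FUNCTION ALGORITHM """
--     # INITIALIZE TOTAL TO 0.
--     total: int = 0
--     # ITERATE THROUGH EACH LETTER IN THE MESSAGE (CONVERTED TO LOWERCASE).
--     for letter in message.lower():
--         # CHECK IF THE CHARACTER IS A LETTER.
--         if 'a' <= letter <= 'z':
--             # GET THE NUMERICAL VALUE OF THE LETTER (A=0, B=1, ...).
--             value: int = ord(letter) - ord('a')
--             # IF THE LETTER IS A VOWEL, MULTIPLY ITS VALUE BY 2.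
--             if letter in "aiueo":
--                 total += value * 2
--             # OTHERWISE, ADD ITS VALUE.
--             else:
--                 total += value
--     # RETURN THE TOTAL SUM.
--     return total
-- ===== SOURCE B (Python) =====
-- def convertMessage(message: str) -> int:
--     """ Description: `[FUNCTION] convertMessage` (two-pass re-implementation) """
--     # Sum every letter's value once, then add the vowel values a second time:
--     # value + value == value * 2 for vowels, so this equals A's branching loop.
--     m = message.lower()
--     base = sum(ord(c) - ord('a') for c in m if 'a' <= c <= 'z')
--     vowel_bonus = sum(ord(c) - ord('a') for c in m if c in "aiueo")
--     return base + vowel_bonus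
-- ===== Notes on version B (the rewrite author's own statement) =====
-- stated objective: alternative
-- what changed: B replaces A's single branching accumulation by two staged filtered sums: all letter values once plus the vowel values a second time (value + value = value*2), with no per-character branch or accumulator.
import Mathlib
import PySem

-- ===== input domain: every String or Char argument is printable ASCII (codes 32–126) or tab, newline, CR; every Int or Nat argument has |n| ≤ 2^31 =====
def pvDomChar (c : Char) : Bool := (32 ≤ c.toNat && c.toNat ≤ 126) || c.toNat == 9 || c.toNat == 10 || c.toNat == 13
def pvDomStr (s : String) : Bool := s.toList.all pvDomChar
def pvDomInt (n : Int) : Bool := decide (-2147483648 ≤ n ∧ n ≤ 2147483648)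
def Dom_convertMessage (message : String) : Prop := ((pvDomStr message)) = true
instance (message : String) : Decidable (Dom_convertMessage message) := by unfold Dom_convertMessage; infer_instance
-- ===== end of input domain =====

-- B replaces A's single branching accumulation by two staged filtered sums (all letter values + vowel values again); alternative decomposition, same result.


-- ===== PORT A =====
-- for letter in message.lower(): if 'a' <= letter <= 'z': add value (doubled for vowels)
def convertMessage (message : String) : Int :=
  (PySem.Chars.lower message.toList).foldl
    (fun total letter =>
      if 'a' ≤ letter ∧ letter ≤ 'z' then
        if letter ∈ ['a', 'i', 'u', 'e', 'o'] then
          total + ((letter.toNat : Int) - ('a'.toNat : Int)) * 2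
        else
          total + ((letter.toNat : Int) - ('a'.toNat : Int))
      else total) 0

-- ===== PORT B =====
-- base = sum over letters of the lowercased message; vowel_bonus = sum over vowels; return base + vowel_bonus
def convertMessage_alt (message : String) : Int :=
  ((((PySem.Chars.lower message.toList).filter
        (fun c => decide ('a' ≤ c ∧ c ≤ 'z'))).map
      (fun c => (c.toNat : Int) - ('a'.toNat : Int))).sum)
  + ((((PySem.Chars.lower message.toList).filter
        (fun c => decide (c ∈ ['a', 'i', 'u', 'e', 'o']))).map
      (fun c => (c.toNat : Int) - ('a'.toNat : Int))).sum)

-- ===== PRECONDITION & SPEC =====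
def Spec_convertMessage (message : String) (out : Int) : Prop := out = convertMessage_alt message
instance (message : String) (out : Int) : Decidable (Spec_convertMessage message out) := by unfold Spec_convertMessage; infer_instance

-- ===== CLAIM =====
def Claim_equal_convertMessage : Prop := ∀ (message : String), Dom_convertMessage message → Spec_convertMessage message (convertMessage message)

-- ===== LEMMAS AND PROOFS =====
-- the per-character contribution of A's loop body
def pvVal (c : Char) : Int :=
  if 'a' ≤ c ∧ c ≤ 'z' then
    if c ∈ ['a', 'i', 'u', 'e', 'o'] then ((c.toNat : Int) - ('a'.toNat : Int)) * 2
    else (c.toNat : Int) - ('a'.toNat : Int)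
  else 0

theorem pvA_eq (l : List Char) :
    l.foldl
      (fun total letter =>
        if 'a' ≤ letter ∧ letter ≤ 'z' then
          if letter ∈ ['a', 'i', 'u', 'e', 'o'] then
            total + ((letter.toNat : Int) - ('a'.toNat : Int)) * 2
          else
            total + ((letter.toNat : Int) - ('a'.toNat : Int))
        else total) 0 = (l.map pvVal).sum := by
  have h : (fun (total : Int) (letter : Char) =>
      if 'a' ≤ letter ∧ letter ≤ 'z' then
        if letter ∈ ['a', 'i', 'u', 'e', 'o'] then
          total + ((letter.toNat : Int) - ('a'.toNat : Int)) * 2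
        else
          total + ((letter.toNat : Int) - ('a'.toNat : Int))
      else total) = fun total letter => total + pvVal letter := by
    funext t c
    simp only [pvVal]
    split_ifs <;> ring
  rw [h, PySem.List.foldl_add]
  simp

-- the two staged sums of B rebuild the per-character sum of pvVal
theorem pvB_eq (l : List Char) :
    ((l.filter (fun c => decide ('a' ≤ c ∧ c ≤ 'z'))).map
        (fun c => (c.toNat : Int) - ('a'.toNat : Int))).sum
      + ((l.filter (fun c => decide (c ∈ ['a', 'i', 'u', 'e', 'o']))).map
        (fun c => (c.toNat : Int) - ('a'.toNat : Int))).sum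
      = (l.map pvVal).sum := by
  induction l with
  | nil => simp
  | cons c l ih =>
    have hstep : ((c :: l).map pvVal).sum = pvVal c + (l.map pvVal).sum := by
      simp
    by_cases hv : c ∈ ['a', 'i', 'u', 'e', 'o']
    · have hl : 'a' ≤ c ∧ c ≤ 'z' := by
        fin_cases hv <;> exact ⟨by decide, by decide⟩
      have hval : pvVal c = ((c.toNat : Int) - ('a'.toNat : Int)) * 2 := by
        simp [pvVal, hl, hv]
      rw [List.filter_cons, List.filter_cons, if_pos (by simp [hl.1, hl.2]),
        if_pos (by simp [hv]), List.map_cons, List.sum_cons,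
        List.map_cons, List.sum_cons, hstep, hval, ← ih]
      ring
    · by_cases hl : 'a' ≤ c ∧ c ≤ 'z'
      · have hval : pvVal c = (c.toNat : Int) - ('a'.toNat : Int) := by
          simp [pvVal, hl, hv]
        rw [List.filter_cons, List.filter_cons, if_pos (by simp [hl.1, hl.2]),
          if_neg (by simp [hv]), List.map_cons, List.sum_cons, hstep, hval, ← ih]
        ring
      · have hval : pvVal c = 0 := by simp [pvVal, hl]
        rw [List.filter_cons, List.filter_cons, if_neg (by simp [hl]),
          if_neg (by simp [hv]), hstep, hval, ← ih]
        ring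

-- ===== VERDICT =====
theorem convertMessage_spec : Claim_equal_convertMessage := by
  intro message _
  show convertMessage message = convertMessage_alt message
  unfold convertMessage convertMessage_alt
  rw [pvA_eq, pvB_eq]
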